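-- pv_equiv track=rewrite | github.com/956MB/Kata | 5kyu/Python/tongues.py | tongues
-- ===== SOURCE A (Python) =====
-- def tongues(code):
--     vL, vU, cL, cU, out = 'aiyeou', 'AIYEOU', 'bkxznhdcwgpvjqtsrlmf', 'BKXZNHDCWGPVJQTSRLMF', ''
--
--     for i in range(0, len(code)):
--         if code[i] in vL: out += vL[(vL.index(code[i]) + 3) % 6]
--         elif code[i] in vU: out += vU[(vU.index(code[i]) + 3) % 6]
--         elif code[i] in cL: out += cL[(cL.index(code[i]) + 10) % 20]
--         elif code[i] in cU: out += cU[(cU.index(code[i]) + 10) % 20]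
--         else: out += code[i]
--
--     return out
-- ===== SOURCE B (Python) =====
-- def tongues(code):
--     # Each shift is half its group's length, so the cipher just swaps paired
--     # halves: 'aiy'<->'eou' and 'bkxznhdcwg'<->'pvjqtsrlmf' (both cases).
--     pairs = (('aiy', 'eou'), ('AIY', 'EOU'),
--              ('bkxznhdcwg', 'pvjqtsrlmf'), ('BKXZNHDCWG', 'PVJQTSRLMF'))
--     src = ''.join(a + b for a, b in pairs)
--     dst = ''.join(b + a for a, b in pairs)
--     return code.translate(str.maketrans(src, dst))
-- ===== Notes on version B (the rewrite author's own statement) =====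
-- stated objective: faster
-- what changed: B drops the rotation arithmetic entirely: since each shift is half its group's length the cipher is an involution swapping paired halves, so B builds src/dst strings from the four half-pairs and applies str.translate(str.maketrans(src, dst)) in one C-level pass, with no membership tests, .index scans or modular shifts.
import Mathlib
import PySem

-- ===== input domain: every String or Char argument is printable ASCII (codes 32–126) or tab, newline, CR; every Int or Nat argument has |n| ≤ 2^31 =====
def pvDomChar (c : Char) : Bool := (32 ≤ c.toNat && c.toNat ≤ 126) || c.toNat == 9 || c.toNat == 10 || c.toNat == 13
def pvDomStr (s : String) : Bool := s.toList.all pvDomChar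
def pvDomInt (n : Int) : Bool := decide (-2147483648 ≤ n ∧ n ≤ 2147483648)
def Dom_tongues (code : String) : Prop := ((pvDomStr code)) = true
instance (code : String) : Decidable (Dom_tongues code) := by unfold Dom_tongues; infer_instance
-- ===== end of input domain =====

-- B replaces the rotation arithmetic by the observation that each shift is half its
-- group's length, so the cipher swaps paired halves; it translates via a table built
-- from those pairs in one pass (objective: faster, measured).

-- ===== PORT A =====
-- A's four local group strings, kept as named helpers
def pvVL : List Char := "aiyeou".toList
def pvVU : List Char := "AIYEOU".toList
def pvCL : List Char := "bkxznhdcwgpvjqtsrlmf".toList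
def pvCU : List Char := "BKXZNHDCWGPVJQTSRLMF".toList

def tongues (code : String) : String :=
  let out : List Char := (PySem.List.pyRange 0 (PySem.Str.len code) 1).foldl
    (fun out i =>
      let c := PySem.List.pyGetD code.toList i ' '
      if c ∈ pvVL then
        out ++ [PySem.List.pyGetD pvVL (PySem.Int.mod (((PySem.List.index? pvVL c).getD 0 : Int) + 3) 6) ' ']
      else if c ∈ pvVU then
        out ++ [PySem.List.pyGetD pvVU (PySem.Int.mod (((PySem.List.index? pvVU c).getD 0 : Int) + 3) 6) ' ']
      else if c ∈ pvCL then
        out ++ [PySem.List.pyGetD pvCL (PySem.Int.mod (((PySem.List.index? pvCL c).getD 0 : Int) + 10) 20) ' ']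
      else if c ∈ pvCU then
        out ++ [PySem.List.pyGetD pvCU (PySem.Int.mod (((PySem.List.index? pvCU c).getD 0 : Int) + 10) 20) ' ']
      else out ++ [c]) []
  String.mk out

-- ===== PORT B =====
-- the four half-pairs of Source B
def pvPairs : List (List Char × List Char) :=
  [("aiy".toList, "eou".toList), ("AIY".toList, "EOU".toList),
   ("bkxznhdcwg".toList, "pvjqtsrlmf".toList), ("BKXZNHDCWG".toList, "PVJQTSRLMF".toList)]

-- src = ''.join(a+b), dst = ''.join(b+a)
def pvSrc : List Char := (pvPairs.map (fun p => p.1 ++ p.2)).flatten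
def pvDst : List Char := (pvPairs.map (fun p => p.2 ++ p.1)).flatten

-- str.maketrans(src, dst): the char-to-char mapping, zipped pairwise
def pvTrans : PySem.Dict Char Char :=
  (pvSrc.zip pvDst).foldl (fun t p => t.insert p.1 p.2) PySem.Dict.empty

-- code.translate(table): mapped chars replaced, others kept
def tongues_alt (code : String) : String :=
  String.mk (code.toList.map (fun c => pvTrans.getD c c))

-- ===== PRECONDITION & SPEC =====
def Spec_tongues (code : String) (out : String) : Prop := out = tongues_alt code
instance (code : String) (out : String) : Decidable (Spec_tongues code out) := by unfold Spec_tongues; infer_instance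

-- ===== CLAIM (what is proved, stated in full; the proofs are below) =====
def Claim_equal_tongues : Prop := ∀ (code : String), Dom_tongues code → Spec_tongues code (tongues code)

-- ===== LEMMAS AND PROOFS =====

-- A's per-character substitution, factored out of the loop body
def pvStepA (c : Char) : Char :=
  if c ∈ pvVL then
    PySem.List.pyGetD pvVL (PySem.Int.mod (((PySem.List.index? pvVL c).getD 0 : Int) + 3) 6) ' '
  else if c ∈ pvVU then
    PySem.List.pyGetD pvVU (PySem.Int.mod (((PySem.List.index? pvVU c).getD 0 : Int) + 3) 6) ' '
  else if c ∈ pvCL then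
    PySem.List.pyGetD pvCL (PySem.Int.mod (((PySem.List.index? pvCL c).getD 0 : Int) + 10) 20) ' '
  else if c ∈ pvCU then
    PySem.List.pyGetD pvCU (PySem.Int.mod (((PySem.List.index? pvCU c).getD 0 : Int) + 10) 20) ' '
  else c

lemma tongues_eq_map (code : String) :
    tongues code = String.mk (code.toList.map pvStepA) := by
  unfold tongues
  have hbody : (fun (out : List Char) (i : Int) =>
      let c := PySem.List.pyGetD code.toList i ' '
      if c ∈ pvVL then
        out ++ [PySem.List.pyGetD pvVL (PySem.Int.mod (((PySem.List.index? pvVL c).getD 0 : Int) + 3) 6) ' ']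
      else if c ∈ pvVU then
        out ++ [PySem.List.pyGetD pvVU (PySem.Int.mod (((PySem.List.index? pvVU c).getD 0 : Int) + 3) 6) ' ']
      else if c ∈ pvCL then
        out ++ [PySem.List.pyGetD pvCL (PySem.Int.mod (((PySem.List.index? pvCL c).getD 0 : Int) + 10) 20) ' ']
      else if c ∈ pvCU then
        out ++ [PySem.List.pyGetD pvCU (PySem.Int.mod (((PySem.List.index? pvCU c).getD 0 : Int) + 10) 20) ' ']
      else out ++ [c]) =
      fun out i => out ++ [pvStepA (PySem.List.pyGetD code.toList i ' ')] := by
    funext out i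
    simp only [pvStepA]
    split_ifs <;> rfl
  rw [PySem.Str.len_eq, hbody,
    PySem.List.foldl_pyRange_zero_pyGetD' (f := fun (out : List Char) c => out ++ [pvStepA c]) (d := ' '),
    PySem.List.foldl_append_singleton_eq_map]
  rfl

set_option maxRecDepth 100000 in
lemma pvStep_agree : ∀ n : Nat, n < 128 →
    pvStepA (Char.ofNat n) = pvTrans.getD (Char.ofNat n) (Char.ofNat n) := by
  decide

-- ===== VERDICT (by name: the statement is the Claim_ definition above) =====
theorem tongues_spec : Claim_equal_tongues := by
  intro code hdom
  unfold Spec_tongues tongues_alt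
  rw [tongues_eq_map]
  have hall : ∀ c ∈ code.toList, pvDomChar c = true := by
    simpa [Dom_tongues, pvDomStr, List.all_eq_true] using hdom
  have hmap : code.toList.map pvStepA
      = code.toList.map (fun c => pvTrans.getD c c) := by
    apply List.map_congr_left
    intro c hc
    have hn : c.toNat < 128 := by
      have := hall c hc
      simp only [pvDomChar, Bool.or_eq_true, Bool.and_eq_true, decide_eq_true_eq,
        beq_iff_eq] at this
      omega
    have := pvStep_agree c.toNat hn
    rwa [Char.ofNat_toNat] at this
  rw [hmap]
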